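-- pv_equiv track=rewrite | github.com/gc-lover/necpgame-monorepo | scripts/convert-miami-quests-to-definition.py | infer_quest_type
-- ===== SOURCE A (Python) =====
-- from typing import Dict, Any, List, Optional
--
-- def infer_quest_type(metadata: Dict, original_data: Dict) -> str:
--     """Infer quest type from metadata and content."""
--     title = metadata.get('title', '').lower()
--     if any(word in title for word in ['race', 'speedboat', 'racer']):
--         return 'racing_drama'
--     elif any(word in title for word in ['art', 'gallery', 'basel']):
--         return 'cultural_exploration'
--     elif any(word in title for word in ['hurricane', 'survival']):
--         return 'survival_drama'
--     elif any(word in title for word in ['cyber', 'hack', 'neural']):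
--         return 'cyberpunk_adventure'
--     elif any(word in title for word in ['drug', 'run']):
--         return 'crime_drama'
--     else:
--         return 'exploration_adventure'
-- ===== SOURCE B (Python) =====
-- # B: instead of a first-match branch ladder, score every keyword with a
-- # priority, take the MINIMUM priority among keywords occurring in the title,
-- # and index a label table with it (5 = default when nothing matches).
-- KEYWORD_PRIORITY = {
--     'race': 0, 'speedboat': 0, 'racer': 0,
--     'art': 1, 'gallery': 1, 'basel': 1,
--     'hurricane': 2, 'survival': 2,
--     'cyber': 3, 'hack': 3, 'neural': 3,
--     'drug': 4, 'run': 4,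
-- }
-- LABELS = ['racing_drama', 'cultural_exploration', 'survival_drama',
--           'cyberpunk_adventure', 'crime_drama', 'exploration_adventure']
--
-- def infer_quest_type(metadata, original_data):
--     title = metadata.get('title', '').lower()
--     best = min((p for w, p in KEYWORD_PRIORITY.items() if w in title), default=5)
--     return LABELS[best]
-- ===== Notes on version B (the rewrite author's own statement) =====
-- stated objective: alternative
-- what changed: Replaced the short-circuiting if/elif ladder with an exhaustive scoring pass: every keyword carries a priority, the minimum priority over all matched keywords is taken, and the label is looked up in a table indexed by that priority.
import Mathlib
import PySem

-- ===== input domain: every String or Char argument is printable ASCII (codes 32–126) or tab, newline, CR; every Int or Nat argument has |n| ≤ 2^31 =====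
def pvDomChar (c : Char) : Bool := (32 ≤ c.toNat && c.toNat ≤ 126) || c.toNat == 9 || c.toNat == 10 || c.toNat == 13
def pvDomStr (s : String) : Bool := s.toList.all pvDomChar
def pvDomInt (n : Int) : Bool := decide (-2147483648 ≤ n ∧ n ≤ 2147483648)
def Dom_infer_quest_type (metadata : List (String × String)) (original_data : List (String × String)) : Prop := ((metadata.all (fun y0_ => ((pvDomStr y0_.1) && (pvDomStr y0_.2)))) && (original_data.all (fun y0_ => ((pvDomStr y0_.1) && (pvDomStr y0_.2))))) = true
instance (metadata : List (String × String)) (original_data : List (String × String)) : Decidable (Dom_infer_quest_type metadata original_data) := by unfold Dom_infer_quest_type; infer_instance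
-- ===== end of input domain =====

-- B replaces A's short-circuiting if/elif ladder by an exhaustive scoring pass:
-- minimum priority over all matched keywords, then a label-table lookup (alternative decomposition).

-- ===== PORT A =====
-- Port of A: the if/elif keyword ladder, branch order unchanged.
def infer_quest_type (metadata : List (String × String)) (original_data : List (String × String)) : String :=
  let title := PySem.Str.lower (PySem.Dict.getD (PySem.Dict.mk metadata) "title" "")
  if (["race", "speedboat", "racer"].any (fun word => PySem.Str.isIn word title)) then
    "racing_drama"
  else if (["art", "gallery", "basel"].any (fun word => PySem.Str.isIn word title)) then
    "cultural_exploration"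
  else if (["hurricane", "survival"].any (fun word => PySem.Str.isIn word title)) then
    "survival_drama"
  else if (["cyber", "hack", "neural"].any (fun word => PySem.Str.isIn word title)) then
    "cyberpunk_adventure"
  else if (["drug", "run"].any (fun word => PySem.Str.isIn word title)) then
    "crime_drama"
  else
    "exploration_adventure"

-- ===== PORT B =====
-- keyword → priority table, in dict insertion order
def pvKeywordPriority : List (String × Int) :=
  [ ("race", 0), ("speedboat", 0), ("racer", 0),
    ("art", 1), ("gallery", 1), ("basel", 1),
    ("hurricane", 2), ("survival", 2),
    ("cyber", 3), ("hack", 3), ("neural", 3),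
    ("drug", 4), ("run", 4) ]

def pvLabels : List String :=
  [ "racing_drama", "cultural_exploration", "survival_drama",
    "cyberpunk_adventure", "crime_drama", "exploration_adventure" ]

-- Port of B: min priority over matched keywords (default 5), then label table.
-- LABELS[best] is ported with getD: best is always in range (0..5), so this is exact.
def infer_quest_type_alt (metadata : List (String × String)) (original_data : List (String × String)) : String :=
  let title := PySem.Str.lower (PySem.Dict.getD (PySem.Dict.mk metadata) "title" "")
  let matched := pvKeywordPriority.filterMap
    (fun wp => if PySem.Str.isIn wp.1 title then some wp.2 else none)
  let best := (PySem.List.min? matched (fun p => p)).getD 5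
  pvLabels.getD best.toNat ""

-- ===== PRECONDITION & SPEC =====
def Spec_infer_quest_type (metadata : List (String × String)) (original_data : List (String × String)) (out : String) : Prop := out = infer_quest_type_alt metadata original_data
instance (metadata : List (String × String)) (original_data : List (String × String)) (out : String) : Decidable (Spec_infer_quest_type metadata original_data out) := by unfold Spec_infer_quest_type; infer_instance

-- ===== CLAIM =====
def Claim_equal_infer_quest_type : Prop := ∀ (metadata : List (String × String)) (original_data : List (String × String)), Dom_infer_quest_type metadata original_data → Spec_infer_quest_type metadata original_data (infer_quest_type metadata original_data)

-- ===== LEMMAS AND PROOFS =====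
-- Both sides depend on the title only through the 13 keyword-membership Booleans;
-- this lemma checks all 2^13 valuations by kernel computation.
set_option maxHeartbeats 4000000 in
theorem pv_bool_cases (b1 b2 b3 b4 b5 b6 b7 b8 b9 b10 b11 b12 b13 : Bool) :
    (if (b1 || (b2 || (b3 || false))) then "racing_drama"
     else if (b4 || (b5 || (b6 || false))) then "cultural_exploration"
     else if (b7 || (b8 || false)) then "survival_drama"
     else if (b9 || (b10 || (b11 || false))) then "cyberpunk_adventure"
     else if (b12 || (b13 || false)) then "crime_drama"
     else "exploration_adventure")
    =
    (pvLabels.getD ((PySem.List.min?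
        (List.filterMap (fun wp : Bool × Int => if wp.1 then some wp.2 else none)
          [ (b1, 0), (b2, 0), (b3, 0), (b4, 1), (b5, 1), (b6, 1),
            (b7, 2), (b8, 2), (b9, 3), (b10, 3), (b11, 3), (b12, 4), (b13, 4) ])
        (fun p => p)).getD 5).toNat "") := by
  revert b1 b2 b3 b4 b5 b6 b7 b8 b9 b10 b11 b12 b13; decide

-- The matched-priorities list of B, rewritten as a filterMap over the membership Booleans.
theorem pv_filterMap_bridge (T : String) :
    pvKeywordPriority.filterMap
      (fun wp => if PySem.Str.isIn wp.1 T then some wp.2 else none)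
    = List.filterMap (fun wp : Bool × Int => if wp.1 then some wp.2 else none)
        [ (PySem.Str.isIn "race" T, 0), (PySem.Str.isIn "speedboat" T, 0), (PySem.Str.isIn "racer" T, 0), (PySem.Str.isIn "art" T, 1), (PySem.Str.isIn "gallery" T, 1), (PySem.Str.isIn "basel" T, 1), (PySem.Str.isIn "hurricane" T, 2), (PySem.Str.isIn "survival" T, 2), (PySem.Str.isIn "cyber" T, 3), (PySem.Str.isIn "hack" T, 3), (PySem.Str.isIn "neural" T, 3), (PySem.Str.isIn "drug" T, 4), (PySem.Str.isIn "run" T, 4) ] := rfl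

-- ===== VERDICT =====
set_option maxHeartbeats 1000000 in
theorem infer_quest_type_spec : Claim_equal_infer_quest_type := by
  intro metadata original_data _
  unfold Spec_infer_quest_type infer_quest_type infer_quest_type_alt
  simp only [List.any_cons, List.any_nil]
  generalize (PySem.Str.lower (PySem.Dict.getD (PySem.Dict.mk metadata) "title" "")) = T
  rw [pv_filterMap_bridge T]
  exact pv_bool_cases _ _ _ _ _ _ _ _ _ _ _ _ _
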